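-- pv_equiv track=rewrite | github.com/feliciatrinh/coding-challenges-and-review | microsoft/longest_substring_without_k_contiguous.py | longest_substring_wo_k_contiguous
-- ===== SOURCE A (Python) =====
-- def longest_substring_wo_k_contiguous(s, k):
--     """
--     Expanded the solution to include other values of k.
--     Runtime: O(n), Space complexity: O(1)
--     """
--     if k < 1:
--         return ""
--
--     longest_substring = ""
--     max_len = 0
--     start = 0
--     freq = 0
--     last_char = ""
--     for j, char in enumerate(s):
--         if char == last_char and freq == k:
--             start = j - (k - 1)
--             freq = k
--         else:
--             if char == last_char:
--                 freq += 1
--             else: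
--                 last_char = char
--                 freq = 1
--             if j - start + 1 > max_len:
--                 max_len = j - start + 1
--                 longest_substring = s[start:j + 1]
--     return longest_substring
-- ===== SOURCE B (Python) =====
-- def longest_substring_wo_k_contiguous(s, k):
--     """Two-stage algorithm: run-length encode the string, then scan the runs,
--     cutting the window at every run longer than k; slice the string once at the end."""
--     if k < 1:
--         return ""
--     # stage 1: run-length encoding as (start_index, length) pairs
--     runs = []
--     i = 0
--     n = len(s)
--     while i < n:
--         j = i
--         while j < n and s[j] == s[i]:
--             j += 1
--         runs.append((i, j - i))
--         i = j
--     # stage 2: scan runs; a run longer than k ends the current segment after its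
--     # first k chars and starts the next one at its last k chars
--     best_start = 0
--     best_len = 0
--     seg_start = 0
--     for start, length in runs:
--         if length > k:
--             end = start + k
--             if end - seg_start > best_len:
--                 best_start, best_len = seg_start, end - seg_start
--             seg_start = start + length - k
--         else:
--             end = start + length
--             if end - seg_start > best_len:
--                 best_start, best_len = seg_start, end - seg_start
--     return s[best_start:best_start + best_len]
-- ===== Notes on version B (the rewrite author's own statement) =====
-- stated objective: faster
-- what changed: B replaces A's single character-by-character sliding-window scan (which slices s[start:j+1] on every new maximum, O(n) per update) by a two-stage algorithm: first run-length encode the string into (start,length) runs, then scan the runs, ending a segment at the first k chars of every run longer than k and restarting it at that run's last k chars, and slice the string exactly once at the end.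
import Mathlib
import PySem

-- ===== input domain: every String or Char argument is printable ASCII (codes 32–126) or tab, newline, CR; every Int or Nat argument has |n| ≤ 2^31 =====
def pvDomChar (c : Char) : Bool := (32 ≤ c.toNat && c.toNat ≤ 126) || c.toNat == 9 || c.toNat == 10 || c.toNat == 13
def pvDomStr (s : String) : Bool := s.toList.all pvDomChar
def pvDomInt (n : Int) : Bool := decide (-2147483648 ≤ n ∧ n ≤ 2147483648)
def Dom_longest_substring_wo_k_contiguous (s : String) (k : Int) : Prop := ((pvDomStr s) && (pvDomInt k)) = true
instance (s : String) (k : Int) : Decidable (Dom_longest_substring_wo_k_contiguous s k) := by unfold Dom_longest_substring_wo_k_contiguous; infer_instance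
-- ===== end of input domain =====

-- B replaces A's character-by-character sliding-window scan (slicing on each new maximum)
-- by a run-length encoding followed by a scan over the runs, slicing once at the end
-- (objective: faster).

-- ===== PORT A =====
-- A's loop state: (longest_substring, max_len, start, freq, last_char); strings are
-- carried as List Char (the PySem representation of Python str contents).
def pvStepA (l : List Char) (k : Int)
    (st : List Char × Int × Int × Int × List Char) (jc : Int × Char) :
    List Char × Int × Int × Int × List Char :=
  let longest := st.1
  let maxLen := st.2.1
  let start := st.2.2.1
  let freq := st.2.2.2.1
  let last := st.2.2.2.2
  let j := jc.1
  let c := jc.2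
  if [c] = last ∧ freq = k then
    (longest, maxLen, j - (k - 1), k, last)
  else
    let freq' : Int := if [c] = last then freq + 1 else 1
    let last' : List Char := if [c] = last then last else [c]
    if j - start + 1 > maxLen then
      (PySem.List.slice l (some start) (some (j + 1)), j - start + 1, start, freq', last')
    else
      (longest, maxLen, start, freq', last')

def longest_substring_wo_k_contiguous (s : String) (k : Int) : String :=
  if k < 1 then "" else
    let r := (PySem.List.enumerate s.toList 0).foldl (pvStepA s.toList k)
      (([] : List Char), (0 : Int), (0 : Int), (0 : Int), ([] : List Char))
    String.ofList r.1

-- ===== PORT B =====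
-- Stage 1 of B: the inner `while j < n and s[j] == s[i]` loop — split off the maximal
-- prefix of characters equal to c, returning its length and the remainder.
def pvRunSplit (c : Char) : List Char → Nat × List Char
  | [] => (0, [])
  | d :: rest => if d = c then
      let nr := pvRunSplit c rest
      (nr.1 + 1, nr.2)
    else (0, d :: rest)

lemma pvRunSplit_len_le (c : Char) : ∀ l : List Char, (pvRunSplit c l).2.length ≤ l.length := by
  intro l
  induction l with
  | nil => simp [pvRunSplit]
  | cons d rest ih =>
    by_cases h : d = c
    · simp only [pvRunSplit, if_pos h]
      exact le_trans ih (Nat.le_succ _)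
    · simp [pvRunSplit, if_neg h]

-- Stage 1 of B: the outer `while i < n` loop building the runs list of (start, length).
def pvRuns : List Char → Int → List (Int × Int)
  | [], _ => []
  | c :: rest, i =>
    let nr := pvRunSplit c rest
    (i, (nr.1 : Int) + 1) :: pvRuns nr.2 (i + nr.1 + 1)
termination_by l => l.length
decreasing_by exact Nat.lt_succ_of_le (pvRunSplit_len_le _ _)

-- Stage 2 of B: the fold over the runs; state (best_start, best_len, seg_start).
def pvStepB (k : Int) (st : Int × Int × Int) (run : Int × Int) : Int × Int × Int :=
  let bs := st.1
  let bl := st.2.1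
  let seg := st.2.2
  let start := run.1
  let len := run.2
  if len > k then
    let e := start + k
    if e - seg > bl then (seg, e - seg, start + len - k) else (bs, bl, start + len - k)
  else
    let e := start + len
    if e - seg > bl then (seg, e - seg, seg) else (bs, bl, seg)

def longest_substring_wo_k_contiguous_alt (s : String) (k : Int) : String :=
  if k < 1 then "" else
    let r := (pvRuns s.toList 0).foldl (pvStepB k) ((0 : Int), (0 : Int), (0 : Int))
    String.ofList (PySem.List.slice s.toList (some r.1) (some (r.1 + r.2.1)))

-- ===== PRECONDITION & SPEC =====
def Spec_longest_substring_wo_k_contiguous (s : String) (k : Int) (out : String) : Prop := out = longest_substring_wo_k_contiguous_alt s k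
instance (s : String) (k : Int) (out : String) : Decidable (Spec_longest_substring_wo_k_contiguous s k out) := by unfold Spec_longest_substring_wo_k_contiguous; infer_instance

-- ===== CLAIM (what is proved, stated in full; the proofs are below) =====
def Claim_equal_longest_substring_wo_k_contiguous : Prop := ∀ (s : String) (k : Int), Dom_longest_substring_wo_k_contiguous s k → Spec_longest_substring_wo_k_contiguous s k (longest_substring_wo_k_contiguous s k)

-- ===== LEMMAS AND PROOFS =====

-- congruence for the 5-tuples of A's loop state
lemma pvMk5 (a1 b1 : List Char) (a2 b2 a3 b3 a4 b4 : Int) (a5 b5 : List Char)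
    (e1 : a1 = b1) (e2 : a2 = b2) (e3 : a3 = b3) (e4 : a4 = b4) (e5 : a5 = b5) :
    ((a1, a2, a3, a4, a5) : List Char × Int × Int × Int × List Char) = (b1, b2, b3, b4, b5) := by
  subst_vars; rfl

-- pvRunSplit really splits off a maximal run: l = c^n ++ r with r not starting with c.
lemma pvRunSplit_spec (c : Char) : ∀ l : List Char,
    l = List.replicate (pvRunSplit c l).1 c ++ (pvRunSplit c l).2 ∧
      (∀ d r', (pvRunSplit c l).2 = d :: r' → d ≠ c) := by
  intro l
  induction l with
  | nil => simp [pvRunSplit]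
  | cons d rest ih =>
    by_cases h : d = c
    · subst h
      have e : pvRunSplit d (d :: rest) =
          ((pvRunSplit d rest).1 + 1, (pvRunSplit d rest).2) := by
        simp [pvRunSplit]
      rw [e]
      exact ⟨by rw [List.replicate_succ, List.cons_append, ← ih.1], ih.2⟩
    · have e : pvRunSplit c (d :: rest) = (0, d :: rest) := by
        simp [pvRunSplit, h]
      rw [e]
      exact ⟨rfl, by intro d' r' he; cases he; exact h⟩

-- A's "update the maximum" step, as a function of the window end e (window [st, e)).
def pvUpd (l lg : List Char) (m st e : Int) : List Char :=
  if e - st > m then PySem.List.slice l (some st) (some e) else lg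

lemma pvUpd_of_le (l lg : List Char) (m st e : Int) (h : e - st ≤ m) :
    pvUpd l lg m st e = lg := by
  unfold pvUpd; rw [if_neg (by omega)]

-- Two successive updates with growing windows collapse to the last one.
lemma pvUpd_pvUpd (l lg : List Char) (m st e1 e2 : Int) (h : e1 ≤ e2) :
    pvUpd l (pvUpd l lg m st e1) (max m (e1 - st)) st e2 = pvUpd l lg m st e2 := by
  unfold pvUpd
  by_cases h2 : e2 - st > m
  · by_cases hmax : e2 - st > max m (e1 - st)
    · rw [if_pos hmax, if_pos h2]
    · have he : e1 = e2 := by omega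
      subst he
      rw [if_neg hmax]
  · rw [if_neg (show ¬ e2 - st > max m (e1 - st) by omega), if_neg h2,
      if_neg (show ¬ e1 - st > m by omega)]

-- The reset step of A (same char, freq already k).
lemma pvStepA_reset (l : List Char) (k : Int) (lg : List Char) (m st f : Int)
    (last : List Char) (p : Int) (c : Char)
    (hc : [c] = last) (hfk : f = k) :
    pvStepA l k (lg, m, st, f, last) (p, c) = (lg, m, p - (k - 1), k, last) := by
  simp only [pvStepA]
  rw [if_pos ⟨hc, hfk⟩]

-- One non-reset step of A on character c at index p.
lemma pvStepA_push (l : List Char) (k : Int) (lg : List Char) (m st f : Int)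
    (last : List Char) (p : Int) (c : Char) (f' : Int)
    (hnr : ¬([c] = last ∧ f = k))
    (hf' : (if [c] = last then f + 1 else 1) = f') :
    pvStepA l k (lg, m, st, f, last) (p, c) =
      (pvUpd l lg m st (p + 1), max m (p + 1 - st), st, f', [c]) := by
  simp only [pvStepA]
  rw [if_neg hnr]
  have hl : (if [c] = last then last else [c]) = [c] := by
    by_cases hc : [c] = last
    · rw [if_pos hc, ← hc]
    · rw [if_neg hc]
  rw [hl, hf']
  unfold pvUpd
  by_cases hm : p - st + 1 > m
  · rw [if_pos hm, if_pos (show p + 1 - st > m by omega)]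
    exact pvMk5 _ _ _ _ _ _ _ _ _ _ rfl (by omega) rfl rfl rfl
  · rw [if_neg hm, if_neg (show ¬ p + 1 - st > m by omega)]
    exact pvMk5 _ _ _ _ _ _ _ _ _ _ rfl (by omega) rfl rfl rfl

-- Closed form for A's fold over the continuation of a run of c's (last_char already c).
lemma pvCont (l : List Char) (k : Int) (hk : 1 ≤ k) (c : Char) :
    ∀ (L : Nat) (p m st f : Int) (lg : List Char),
      1 ≤ f → f ≤ k → f ≤ p - st → p - st ≤ m →
      (PySem.List.enumerate (List.replicate L c) p).foldl (pvStepA l k) (lg, m, st, f, [c]) =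
        if f + (L : Int) ≤ k then
          (pvUpd l lg m st (p + (L : Int)), max m (p + (L : Int) - st), st, f + (L : Int), [c])
        else
          (pvUpd l lg m st (p + (k - f)), max m (p + (k - f) - st),
            p + (L : Int) - k, k, [c]) := by
  intro L
  induction L with
  | zero =>
    intro p m st f lg h1 h2 h3 h4
    simp only [List.replicate, PySem.List.enumerate_nil, List.foldl_nil, Nat.cast_zero, add_zero]
    rw [if_pos h2, pvUpd_of_le l lg m st p (by omega)]
    exact pvMk5 _ _ _ _ _ _ _ _ _ _ rfl (by omega) rfl rfl rfl
  | succ L ih =>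
    intro p m st f lg h1 h2 h3 h4
    rw [show ((L + 1 : Nat) : Int) = (L : Int) + 1 from by push_cast; ring]
    rw [show f + ((L : Int) + 1) = f + (L : Int) + 1 from by ring,
      show p + ((L : Int) + 1) = p + (L : Int) + 1 from by ring]
    rw [List.replicate_succ, PySem.List.enumerate_cons, List.foldl_cons]
    by_cases hf : f = k
    · rw [pvStepA_reset l k lg m st f [c] p c rfl hf, ih (p + 1) m (p - (k - 1)) k lg hk le_rfl (by omega) (by omega)]
      rw [if_neg (show ¬ f + (L : Int) + 1 ≤ k by omega),
        pvUpd_of_le l lg m st (p + (k - f)) (by omega)]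
      by_cases hL0 : (L : Int) = 0
      · rw [if_pos (show k + (L : Int) ≤ k by omega),
          pvUpd_of_le l lg m (p - (k - 1)) (p + 1 + (L : Int)) (by omega)]
        exact pvMk5 _ _ _ _ _ _ _ _ _ _ rfl (by omega) (by omega) (by omega) rfl
      · rw [if_neg (show ¬ k + (L : Int) ≤ k by omega),
          pvUpd_of_le l lg m (p - (k - 1)) (p + 1 + (k - k)) (by omega)]
        exact pvMk5 _ _ _ _ _ _ _ _ _ _ rfl (by omega) (by omega) rfl rfl
    · rw [pvStepA_push l k lg m st f [c] p c (f + 1) (fun hh => hf hh.2) (if_pos rfl),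
        ih (p + 1) (max m (p + 1 - st)) st (f + 1) (pvUpd l lg m st (p + 1))
          (by omega) (by omega) (by omega) (by omega)]
      by_cases hle : f + 1 + (L : Int) ≤ k
      · rw [if_pos hle, if_pos (show f + (L : Int) + 1 ≤ k by omega),
          pvUpd_pvUpd l lg m st (p + 1) (p + 1 + (L : Int)) (by omega)]
        exact pvMk5 _ _ _ _ _ _ _ _ _ _
          (by rw [show p + (L : Int) + 1 = p + 1 + (L : Int) from by ring])
          (by omega) rfl (by omega) rfl
      · rw [if_neg hle, if_neg (show ¬ f + (L : Int) + 1 ≤ k by omega),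
          pvUpd_pvUpd l lg m st (p + 1) (p + 1 + (k - (f + 1))) (by omega)]
        exact pvMk5 _ _ _ _ _ _ _ _ _ _
          (by rw [show p + (k - f) = p + 1 + (k - (f + 1)) from by ring])
          (by omega) (by omega) rfl rfl

-- Closed form for A's fold over a whole maximal run of L+1 characters c (fresh last_char).
lemma pvRun (l : List Char) (k : Int) (hk : 1 ≤ k) (c : Char) (L : Nat)
    (p m st f : Int) (lg last : List Char)
    (hne : last ≠ [c]) (hst : st ≤ p) (hm : p - st ≤ m) :
    (PySem.List.enumerate (List.replicate (L + 1) c) p).foldl (pvStepA l k)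
        (lg, m, st, f, last) =
      if (L : Int) + 1 ≤ k then
        (pvUpd l lg m st (p + (L : Int) + 1), max m (p + (L : Int) + 1 - st), st,
          (L : Int) + 1, [c])
      else
        (pvUpd l lg m st (p + k), max m (p + k - st), p + (L : Int) + 1 - k, k, [c]) := by
  rw [List.replicate_succ, PySem.List.enumerate_cons, List.foldl_cons]
  rw [pvStepA_push l k lg m st f last p c 1 (fun hh => hne hh.1.symm)
    (if_neg (fun hc => hne hc.symm))]
  rw [pvCont l k hk c L (p + 1) (max m (p + 1 - st)) st 1 (pvUpd l lg m st (p + 1))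
    le_rfl hk (by omega) (by omega)]
  by_cases hfit : (1 : Int) + (L : Int) ≤ k
  · rw [if_pos hfit, if_pos (show (L : Int) + 1 ≤ k by omega),
      pvUpd_pvUpd l lg m st (p + 1) (p + 1 + (L : Int)) (by omega)]
    exact pvMk5 _ _ _ _ _ _ _ _ _ _
      (by rw [show p + (L : Int) + 1 = p + 1 + (L : Int) from by ring])
      (by omega) rfl (by omega) rfl
  · rw [if_neg hfit, if_neg (show ¬ (L : Int) + 1 ≤ k by omega),
      pvUpd_pvUpd l lg m st (p + 1) (p + 1 + (k - 1)) (by omega)]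
    exact pvMk5 _ _ _ _ _ _ _ _ _ _
      (by rw [show p + k = p + 1 + (k - 1) from by ring])
      (by omega) (by omega) rfl rfl

-- The coupling invariant between A's full state and B's (best_start, best_len, seg_start)
-- at a run boundary with next index p.
def pvRel (full : List Char) (p : Int)
    (a : List Char × Int × Int × Int × List Char) (b : Int × Int × Int) : Prop :=
  a.1 = PySem.List.slice full (some b.1) (some (b.1 + b.2.1))
  ∧ a.2.1 = b.2.1
  ∧ a.2.2.1 = b.2.2
  ∧ a.2.2.1 ≤ p
  ∧ p - a.2.2.1 ≤ a.2.1

-- An A-side update matches a B-side best-window update.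
lemma pvUpd_best (full lg : List Char) (bs bl st e : Int)
    (h1 : lg = PySem.List.slice full (some bs) (some (bs + bl))) :
    pvUpd full lg bl st e =
      PySem.List.slice full (some (if e - st > bl then st else bs))
        (some ((if e - st > bl then st else bs) + (if e - st > bl then e - st else bl))) := by
  unfold pvUpd
  by_cases hb : e - st > bl
  · simp only [if_pos hb]
    rw [show st + (e - st) = e from by ring]
  · simp only [if_neg hb]
    exact h1

-- Main simulation: folding A's step over the characters from index p equals (under pvRel)
-- folding B's step over the runs of the same suffix.
lemma pvMain (full : List Char) (k : Int) (hk : 1 ≤ k) :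
    ∀ (l : List Char) (p m st f : Int) (lg last : List Char) (bs bl : Int),
      pvRel full p (lg, m, st, f, last) (bs, bl, st) →
      (∀ c r, l = c :: r → last ≠ [c]) →
      pvRel full (p + l.length)
        ((PySem.List.enumerate l p).foldl (pvStepA full k) (lg, m, st, f, last))
        ((pvRuns l p).foldl (pvStepB k) (bs, bl, st)) := by
  intro l
  induction hn : l.length using Nat.strong_induction_on generalizing l with
  | _ n ih =>
  intro p m st f lg last bs bl hrel hlast
  match l with
  | [] =>
    subst hn
    simpa [pvRuns, PySem.List.enumerate_nil] using hrel
  | c :: rest =>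
    subst hn
    obtain ⟨h1, h2, h3, h4, h5⟩ := hrel
    dsimp only at h1 h2 h3 h4 h5
    subst h2
    obtain ⟨hsplit, hhead⟩ := pvRunSplit_spec c rest
    set nr := pvRunSplit c rest with hnr
    have hne : last ≠ [c] := hlast c rest rfl
    have hdecomp : c :: rest = List.replicate (nr.1 + 1) c ++ nr.2 := by
      rw [List.replicate_succ, List.cons_append]; exact congrArg (c :: ·) hsplit
    have hlen : (c :: rest).length = (nr.1 + 1) + nr.2.length := by
      rw [hdecomp]; simp
    have hlt : nr.2.length < (c :: rest).length := by
      have hle2 := pvRunSplit_len_le c rest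
      rw [← hnr] at hle2
      simp only [List.length_cons]
      omega
    have hlast' : ∀ d r, nr.2 = d :: r → ([c] : List Char) ≠ [d] := by
      intro d r he hcd
      exact (hhead d r he) (by injection hcd with h'; exact h'.symm)
    have hBlist : pvRuns (c :: rest) p =
        (p, (nr.1 : Int) + 1) :: pvRuns nr.2 (p + (nr.1 : Int) + 1) := by
      rw [pvRuns]
    rw [hBlist, List.foldl_cons, hlen,
      show (c :: rest : List Char) = List.replicate (nr.1 + 1) c ++ nr.2 from hdecomp,
      PySem.List.enumerate_append, List.foldl_append,
      show ((List.replicate (nr.1 + 1) c).length) = nr.1 + 1 from by simp,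
      show (((nr.1 + 1 : Nat)) : Int) = (nr.1 : Int) + 1 from by push_cast; ring,
      show p + ((nr.1 : Int) + 1) = p + (nr.1 : Int) + 1 from by ring,
      show ((((nr.1 + 1) + nr.2.length : Nat)) : Int)
        = (nr.1 : Int) + 1 + (nr.2.length : Int) from by push_cast; ring,
      show p + ((nr.1 : Int) + 1 + (nr.2.length : Int))
        = p + (nr.1 : Int) + 1 + (nr.2.length : Int) from by ring,
      pvRun full k hk c nr.1 p m st f lg last hne h4 h5]
    by_cases hfit : (nr.1 : Int) + 1 ≤ k
    · rw [if_pos hfit]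
      have hBstep : pvStepB k (bs, m, st) (p, (nr.1 : Int) + 1) =
          (if p + (nr.1 : Int) + 1 - st > m then st else bs,
            if p + (nr.1 : Int) + 1 - st > m then p + (nr.1 : Int) + 1 - st else m,
            st) := by
        simp only [pvStepB]
        rw [if_neg (show ¬ (nr.1 : Int) + 1 > k by omega),
          show p + ((nr.1 : Int) + 1) = p + (nr.1 : Int) + 1 from by ring]
        split_ifs <;> rfl
      rw [hBstep]
      have hrel' : pvRel full (p + (nr.1 : Int) + 1)
          (pvUpd full lg m st (p + (nr.1 : Int) + 1),
            max m (p + (nr.1 : Int) + 1 - st), st, (nr.1 : Int) + 1, [c])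
          ((if p + (nr.1 : Int) + 1 - st > m then st else bs),
            (if p + (nr.1 : Int) + 1 - st > m then p + (nr.1 : Int) + 1 - st else m),
            st) := by
        unfold pvRel
        dsimp only
        refine ⟨pvUpd_best full lg bs m st (p + (nr.1 : Int) + 1) h1,
          by split_ifs <;> omega, rfl, by omega, by omega⟩
      exact ih nr.2.length hlt nr.2 rfl (p + (nr.1 : Int) + 1) _ st ((nr.1 : Int) + 1)
        _ [c] _ _ hrel' hlast'
    · rw [if_neg hfit]
      have hBstep : pvStepB k (bs, m, st) (p, (nr.1 : Int) + 1) =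
          (if p + k - st > m then st else bs,
            if p + k - st > m then p + k - st else m,
            p + (nr.1 : Int) + 1 - k) := by
        simp only [pvStepB]
        rw [if_pos (show (nr.1 : Int) + 1 > k by omega),
          show p + ((nr.1 : Int) + 1) - k = p + (nr.1 : Int) + 1 - k from by ring]
        split_ifs <;> rfl
      rw [hBstep]
      have hrel' : pvRel full (p + (nr.1 : Int) + 1)
          (pvUpd full lg m st (p + k), max m (p + k - st), p + (nr.1 : Int) + 1 - k,
            k, [c])
          ((if p + k - st > m then st else bs),
            (if p + k - st > m then p + k - st else m),
            p + (nr.1 : Int) + 1 - k) := by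
        unfold pvRel
        dsimp only
        refine ⟨pvUpd_best full lg bs m st (p + k) h1,
          by split_ifs <;> omega, rfl, by omega, by omega⟩
      exact ih nr.2.length hlt nr.2 rfl (p + (nr.1 : Int) + 1) _ (p + (nr.1 : Int) + 1 - k)
        k _ [c] _ _ hrel' hlast'

-- ===== VERDICT (by name: the statement is the Claim_ definition above) =====
theorem longest_substring_wo_k_contiguous_spec : Claim_equal_longest_substring_wo_k_contiguous := by
  intro s k _
  unfold Spec_longest_substring_wo_k_contiguous
  unfold longest_substring_wo_k_contiguous longest_substring_wo_k_contiguous_alt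
  by_cases hk : k < 1
  · rw [if_pos hk, if_pos hk]
  · rw [if_neg hk, if_neg hk]
    have hinit : pvRel s.toList 0
        (([] : List Char), (0 : Int), (0 : Int), (0 : Int), ([] : List Char))
        ((0 : Int), (0 : Int), (0 : Int)) := by
      unfold pvRel
      dsimp only
      refine ⟨?_, rfl, rfl, le_rfl, by omega⟩
      show ([] : List Char) = PySem.List.slice s.toList (some 0) (some (0 + 0))
      simp [pysem]
    have h := pvMain s.toList k (by omega) s.toList 0 0 0 0 [] [] 0 0 hinit
      (by intro c r he; simp)
    simp only [h.1]
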